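-- pv_equiv track=rewrite | github.com/VyacheslavGusev/Tg_bot_Yandex_OCR | packeges/middleware/Validation.py | split_on_keyword
-- ===== SOURCE A (Python) =====
-- def split_on_keyword(data, keyword):
--     result = []
--     current_list = []
--
--     for item in data:
--         if item['text'].lower().strip() == keyword:
--             if current_list:
--                 result.append(current_list)
--             current_list = [item]
--         else:
--             current_list.append(item)
--
--     # Добавляем последний список, если он не пустой
--     if current_list:
--         result.append(current_list)
--
--     return result
-- ===== SOURCE B (Python) =====
-- def split_on_keyword(data, keyword):
--     # Two staged passes: first collect the indices of all keyword items,
--     # then cut data into slices between consecutive boundaries.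
--     idxs = [i for i, item in enumerate(data) if item['text'].lower().strip() == keyword]
--     result = []
--     prev = 0
--     for b in idxs + [len(data)]:
--         if prev < b:
--             result.append(data[prev:b])
--         prev = b
--     return result
-- ===== Notes on version B (the rewrite author's own statement) =====
-- stated objective: alternative
-- what changed: B replaces A's single-pass current-list state machine by two staged passes: it first precomputes the keyword match indices with a comprehension over enumerate(data) and then emits the non-empty slices of data between consecutive boundaries.
import Mathlib
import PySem

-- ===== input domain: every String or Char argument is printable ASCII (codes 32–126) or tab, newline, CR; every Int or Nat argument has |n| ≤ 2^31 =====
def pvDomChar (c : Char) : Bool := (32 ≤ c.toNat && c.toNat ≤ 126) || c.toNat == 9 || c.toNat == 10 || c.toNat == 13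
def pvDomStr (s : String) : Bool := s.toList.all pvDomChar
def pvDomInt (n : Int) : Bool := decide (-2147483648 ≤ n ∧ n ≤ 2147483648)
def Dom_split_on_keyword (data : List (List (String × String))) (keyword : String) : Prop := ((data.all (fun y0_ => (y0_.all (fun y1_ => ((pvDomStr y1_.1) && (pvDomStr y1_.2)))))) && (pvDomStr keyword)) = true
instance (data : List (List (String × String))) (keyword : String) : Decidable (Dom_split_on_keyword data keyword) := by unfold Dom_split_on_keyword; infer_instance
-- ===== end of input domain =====

-- B replaces A's single-pass current-list state machine by two staged passes: collect the keyword
-- match indices, then slice data between consecutive boundaries (alternative decomposition, same cost).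


-- ===== PORT A =====
-- item['text'].lower().strip() == keyword; the `none` branch (KeyError in Python) is excluded by Pre_
def kwMatch (item : List (String × String)) (keyword : String) : Bool :=
  match (PySem.Dict.mk item).get? "text" with
  | some s => PySem.Str.strip (PySem.Str.lower s) == keyword
  | none => false

def stepA (keyword : String)
    (st : List (List (List (String × String))) × List (List (String × String)))
    (item : List (String × String)) :
    List (List (List (String × String))) × List (List (String × String)) :=
  if kwMatch item keyword then
    (if st.2.isEmpty then st.1 else st.1 ++ [st.2], [item])
  else
    (st.1, st.2 ++ [item])

def split_on_keyword (data : List (List (String × String))) (keyword : String) : List (List (List (String × String))) :=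
  let st := data.foldl (stepA keyword) ([], [])
  if st.2.isEmpty then st.1 else st.1 ++ [st.2]

-- ===== PORT B =====
-- idxs = [i for i, item in enumerate(data) if item['text'].lower().strip() == keyword];
-- then fold over idxs + [len(data)] appending the slice data[prev:b] when prev < b
def split_on_keyword_alt (data : List (List (String × String))) (keyword : String) : List (List (List (String × String))) :=
  ((((PySem.List.enumerate data).filter (fun p => kwMatch p.2 keyword)).map (·.1)
      ++ [(data.length : Int)]).foldl
    (fun (st : List (List (List (String × String))) × Int) b =>
      (if st.2 < b then st.1 ++ [PySem.List.slice data (some st.2) (some b)] else st.1, b))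
    ([], 0)).1

-- ===== PRECONDITION & SPEC =====
-- Pre_ excludes exactly the inputs on which Python A raises KeyError: an item without a "text" key.
def Pre_split_on_keyword (data : List (List (String × String))) (keyword : String) : Prop :=
  ∀ item ∈ data, ((PySem.Dict.mk item).get? "text").isSome = true
instance (data : List (List (String × String))) (keyword : String) : Decidable (Pre_split_on_keyword data keyword) := by unfold Pre_split_on_keyword; infer_instance

def pvWitness_split_on_keyword : (List (List (String × String))) × String :=
  ([[("text", " K ")], [("text", "a"), ("y", "z")]], "k")

def Spec_split_on_keyword (data : List (List (String × String))) (keyword : String) (out : List (List (List (String × String)))) : Prop := out = split_on_keyword_alt data keyword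
instance (data : List (List (String × String))) (keyword : String) (out : List (List (List (String × String)))) : Decidable (Spec_split_on_keyword data keyword out) := by unfold Spec_split_on_keyword; infer_instance

-- ===== CLAIM (what is proved, stated in full; the proofs are below) =====
def Claim_equal_split_on_keyword : Prop := ∀ (data : List (List (String × String))) (keyword : String), Dom_split_on_keyword data keyword → Pre_split_on_keyword data keyword → Spec_split_on_keyword data keyword (split_on_keyword data keyword)

-- ===== LEMMAS AND PROOFS =====

-- clean grouping recursion both ports are reduced to:
-- goKW kw data = (keyword-started groups, leading non-keyword run)
def goKW (keyword : String) : List (List (String × String)) → List (List (List (String × String))) × List (List (String × String))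
  | [] => ([], [])
  | h :: t =>
    if kwMatch h keyword then ((h :: (goKW keyword t).2) :: (goKW keyword t).1, [])
    else ((goKW keyword t).1, h :: (goKW keyword t).2)

def optcons {α : Type} (x : List α) (l : List (List α)) : List (List α) :=
  if x.isEmpty then l else x :: l

theorem foldlA_eq (keyword : String) (data : List (List (String × String)))
    (res : List (List (List (String × String)))) (cur : List (List (String × String))) :
    (let st := data.foldl (stepA keyword) (res, cur)
     if st.2.isEmpty then st.1 else st.1 ++ [st.2])
      = res ++ optcons (cur ++ (goKW keyword data).2) (goKW keyword data).1 := by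
  induction data generalizing res cur with
  | nil =>
    simp only [List.foldl_nil, goKW, optcons, List.append_nil]
    cases cur <;> simp
  | cons h t ih =>
    by_cases hk : kwMatch h keyword = true
    · simp only [List.foldl_cons, goKW, stepA, hk, if_true]
      rw [ih]
      simp only [optcons, List.append_nil]
      cases cur <;> simp
    · simp only [List.foldl_cons, goKW, stepA, hk, Bool.false_eq_true, if_false]
      rw [ih]
      simp

-- B-side abstractions: natural-number keyword indices and boundary slicing
def natIdxs (keyword : String) : List (List (String × String)) → List Nat
  | [] => []
  | h :: t => (if kwMatch h keyword then [0] else []) ++ (natIdxs keyword t).map (· + 1)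

def segsN (full : List (List (String × String))) : Nat → List Nat → List (List (List (String × String)))
  | _, [] => []
  | p, b :: bs => (if p < b then [List.take (b - p) (List.drop p full)] else []) ++ segsN full b bs

theorem idxs_eq (keyword : String) (xs : List (List (String × String))) (s : Int) :
    ((PySem.List.enumerate xs s).filter (fun p => kwMatch p.2 keyword)).map (·.1)
      = (natIdxs keyword xs).map (fun (n : Nat) => s + (n : Int)) := by
  induction xs generalizing s with
  | nil => simp [PySem.List.enumerate_nil, natIdxs]
  | cons h t ih =>
    rw [PySem.List.enumerate_cons]
    by_cases hk : kwMatch h keyword = true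
    · simp only [natIdxs, hk, if_true, List.singleton_append, List.filter_cons, List.map_cons,
        List.map_map, ih]
      congr 1
      · simp
      apply List.map_congr_left
      intro n _
      simp only [Function.comp_apply]
      push_cast
      ring
    · simp only [natIdxs, hk, Bool.false_eq_true, if_false, List.nil_append, List.filter_cons, ih, List.map_map]
      apply List.map_congr_left
      intro n _
      simp only [Function.comp_apply]
      push_cast
      ring

theorem foldlB_eq (data : List (List (String × String))) (bs : List Nat) (p : Nat)
    (acc : List (List (List (String × String)))) :
    ((bs.map (fun (n : Nat) => (n : Int))).foldl
      (fun (st : List (List (List (String × String))) × Int) b =>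
        (if st.2 < b then st.1 ++ [PySem.List.slice data (some st.2) (some b)] else st.1, b))
      (acc, (p : Int))).1
      = acc ++ segsN data p bs := by
  induction bs generalizing p acc with
  | nil => simp [segsN]
  | cons b t ih =>
    simp only [List.map_cons, List.foldl_cons, PySem.List.slice_natCast, Nat.cast_lt]
    by_cases hpb : p < b
    · rw [if_pos hpb, ih b (acc ++ [List.take (b - p) (List.drop p data)])]
      simp [segsN, hpb]
    · rw [if_neg hpb, ih b acc]
      simp [segsN, hpb]

-- shift: slicing h::t with all bounds moved up by one, past position p+1, is slicing t past p
theorem segsN_shift (h : List (String × String)) (t : List (List (String × String)))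
    (bs : List Nat) (p : Nat) :
    segsN (h :: t) (p + 1) (bs.map (· + 1)) = segsN t p bs := by
  induction bs generalizing p with
  | nil => simp [segsN]
  | cons b cs ih =>
    simp [segsN, ih, Nat.succ_sub_succ]

-- key lemma: with every boundary shifted by one, slicing h::t prepends h to the first group
theorem segs_cons (keyword : String) (h : List (String × String))
    (t : List (List (String × String))) :
    segsN (h :: t) 0 ((natIdxs keyword t ++ [t.length]).map (· + 1))
      = (h :: (goKW keyword t).2) :: (goKW keyword t).1 := by
  induction t generalizing h with
  | nil =>
    simp [natIdxs, segsN, goKW]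
  | cons h' t' ih =>
    by_cases hk : kwMatch h' keyword = true
    · have e : natIdxs keyword (h' :: t') ++ [(h' :: t').length]
          = 0 :: (natIdxs keyword t' ++ [t'.length]).map (· + 1) := by
        simp [natIdxs, hk]
      rw [e, List.map_cons]
      simp only [segsN]
      rw [segsN_shift h (h' :: t') ((natIdxs keyword t' ++ [t'.length]).map (· + 1)) 0, ih h']
      simp [goKW, hk]
    · have e : natIdxs keyword (h' :: t') ++ [(h' :: t').length]
          = (natIdxs keyword t' ++ [t'.length]).map (· + 1) := by
        simp [natIdxs, hk]
      rw [e]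
      obtain ⟨b, cs, hbc⟩ : ∃ b cs, natIdxs keyword t' ++ [t'.length] = b :: cs := by
        cases hx : natIdxs keyword t' ++ [t'.length] with
        | nil => simp at hx
        | cons b cs => exact ⟨b, cs, rfl⟩
      have ihe := ih h'
      rw [hbc] at ihe ⊢
      simp only [List.map_cons, segsN, Nat.zero_lt_succ, if_pos, Nat.sub_zero,
        List.drop_zero, List.singleton_append] at ihe ⊢
      rw [List.cons_eq_cons] at ihe
      obtain ⟨e1, e2⟩ := ihe
      rw [segsN_shift h (h' :: t') (cs.map (· + 1)) (b + 1), e2, List.cons_eq_cons]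
      refine ⟨?_, by simp [goKW, hk]⟩
      rw [List.take_succ_cons, e1]
      simp [goKW, hk]

theorem alt_eq (keyword : String) (data : List (List (String × String))) :
    split_on_keyword_alt data keyword
      = optcons (goKW keyword data).2 (goKW keyword data).1 := by
  have key : split_on_keyword_alt data keyword
      = segsN data 0 (natIdxs keyword data ++ [data.length]) := by
    unfold split_on_keyword_alt
    rw [idxs_eq keyword data 0]
    have e0 : (natIdxs keyword data).map (fun (n : Nat) => (0 : Int) + (n : Int))
        = (natIdxs keyword data).map (fun (n : Nat) => (n : Int)) :=
      List.map_congr_left (by intro n _; ring)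
    have e1 : (natIdxs keyword data).map (fun (n : Nat) => (n : Int)) ++ [(data.length : Int)]
        = (natIdxs keyword data ++ [data.length]).map (fun (n : Nat) => (n : Int)) := by simp
    rw [e0, e1]
    have h2 := foldlB_eq data (natIdxs keyword data ++ [data.length]) 0 []
    simpa using h2
  rw [key]
  cases data with
  | nil => simp [natIdxs, segsN, goKW, optcons]
  | cons h t =>
    by_cases hk : kwMatch h keyword = true
    · have e : natIdxs keyword (h :: t) ++ [(h :: t).length]
          = 0 :: (natIdxs keyword t ++ [t.length]).map (· + 1) := by
        simp [natIdxs, hk]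
      rw [e]
      simp only [segsN, Nat.lt_irrefl, if_false, List.nil_append]
      rw [segs_cons keyword h t]
      simp [goKW, hk, optcons]
    · have e : natIdxs keyword (h :: t) ++ [(h :: t).length]
          = (natIdxs keyword t ++ [t.length]).map (· + 1) := by
        simp [natIdxs, hk]
      rw [e, segs_cons keyword h t]
      simp [goKW, hk, optcons]

-- ===== VERDICT (by name: the statement is the Claim_ definition above) =====
theorem split_on_keyword_spec : Claim_equal_split_on_keyword := by
  intro data keyword _ _
  unfold Spec_split_on_keyword split_on_keyword
  rw [foldlA_eq, alt_eq]
  simp
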